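-- pv_equiv track=rewrite | github.com/rwchapmanii/AcquittifyWorkspace | scripts/chroma_audit_snapshot.py | _length_histogram
-- ===== SOURCE A (Python) =====
-- from collections import Counter, defaultdict
-- from typing import Any, Dict, Iterable, List, Optional, Tuple
--
-- def _length_histogram(lengths: Iterable[int]) -> Dict[str, int]:
--     bins = [0, 200, 400, 600, 800, 1000, 1200, 1500, 2000]
--     counts = Counter()
--     for length in lengths:
--         placed = False
--         for i in range(len(bins) - 1):
--             low = bins[i]
--             high = bins[i + 1]
--             if low <= length < high:
--                 counts[f"{low}-{high}"] += 1
--                 placed = True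
--                 break
--         if not placed:
--             counts[">=2000"] += 1
--     return dict(counts)
-- ===== SOURCE B (Python) =====
-- def _length_histogram(lengths):
--     counts = {}
--     for length in lengths:
--         if length < 0 or length >= 2000:
--             label = ">=2000"
--         elif length < 1200:
--             low = (length // 200) * 200
--             label = f"{low}-{low + 200}"
--         elif length < 1500:
--             label = "1200-1500"
--         else:
--             label = "1500-2000"
--         counts[label] = counts.get(label, 0) + 1
--     return counts
-- ===== Notes on version B (the rewrite author's own statement) =====
-- stated objective: faster
-- what changed: Replaces the inner linear scan over bin boundaries with a closed-form arithmetic bin index (length // 200 for the uniform 0-1200 range plus two explicit wide bins) and a plain dict instead of Counter.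
import Mathlib
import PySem

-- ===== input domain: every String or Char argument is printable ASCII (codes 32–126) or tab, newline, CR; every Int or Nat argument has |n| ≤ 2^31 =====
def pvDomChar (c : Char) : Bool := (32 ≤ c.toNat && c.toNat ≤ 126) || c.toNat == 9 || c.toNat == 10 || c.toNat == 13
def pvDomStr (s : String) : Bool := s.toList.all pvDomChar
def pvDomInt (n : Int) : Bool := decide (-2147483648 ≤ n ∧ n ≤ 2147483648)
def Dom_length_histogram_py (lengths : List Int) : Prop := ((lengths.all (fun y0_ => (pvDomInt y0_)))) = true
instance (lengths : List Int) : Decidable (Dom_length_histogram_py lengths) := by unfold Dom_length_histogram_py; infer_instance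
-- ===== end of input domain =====

-- B replaces A's inner scan over bin boundaries with a closed-form arithmetic bin index (simpler; same output).


-- ===== PORT A =====
def pvBins : List Int := [0, 200, 400, 600, 800, 1000, 1200, 1500, 2000]

-- the inner 'for i in range(len(bins)-1): … break' loop; indices come from range, hence in range (pyGetD default never used)
def pvScanA (length : Int) : List Int → Option String
  | [] => none
  | i :: rest =>
    let low := PySem.List.pyGetD pvBins i 0
    let high := PySem.List.pyGetD pvBins (i + 1) 0
    if low ≤ length ∧ length < high then
      some (PySem.Int.toStr low ++ "-" ++ PySem.Int.toStr high)
    else pvScanA length rest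

def length_histogram_py (lengths : List Int) : List (String × Int) :=
  (lengths.foldl (fun counts length =>
      match pvScanA length (PySem.List.pyRange 0 ((pvBins.length : Int) - 1) 1) with
      | some lbl => counts.modify lbl 0 (· + 1)
      | none => counts.modify ">=2000" 0 (· + 1))
    (PySem.Dict.empty)).items

-- ===== PORT B =====
def pvLabelB (length : Int) : String :=
  if length < 0 ∨ 2000 ≤ length then ">=2000"
  else if length < 1200 then
    let low := PySem.Int.floordiv length 200 * 200
    PySem.Int.toStr low ++ "-" ++ PySem.Int.toStr (low + 200)
  else if length < 1500 then "1200-1500"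
  else "1500-2000"

def length_histogram_py_alt (lengths : List Int) : List (String × Int) :=
  (lengths.foldl (fun counts length =>
      let lbl := pvLabelB length
      counts.insert lbl (counts.getD lbl 0 + 1))
    (PySem.Dict.empty)).items

-- ===== PRECONDITION & SPEC =====
def Spec_length_histogram_py (lengths : List Int) (out : List (String × Int)) : Prop := out = length_histogram_py_alt lengths
instance (lengths : List Int) (out : List (String × Int)) : Decidable (Spec_length_histogram_py lengths out) := by unfold Spec_length_histogram_py; infer_instance

-- ===== CLAIM (what is proved, stated in full; the proofs are below) =====
def Claim_equal_length_histogram_py : Prop := ∀ (lengths : List Int), Dom_length_histogram_py lengths → Spec_length_histogram_py lengths (length_histogram_py lengths)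

-- ===== LEMMAS AND PROOFS =====

lemma pvRange_eval : PySem.List.pyRange 0 ((pvBins.length : Int) - 1) 1 = [0, 1, 2, 3, 4, 5, 6, 7] := by
  decide

lemma pvLabel_eq (l : Int) :
    (pvScanA l [0, 1, 2, 3, 4, 5, 6, 7]).getD ">=2000" = pvLabelB l := by
  simp only [pvScanA]
  norm_num [pvBins, pvLabelB, PySem.List.pyGetD, PySem.List.pyGet?, PySem.List.pyIdx?, List.getElem_cons_zero, List.getElem_cons_succ,
    show Int.toNat 2 = 2 from rfl, show Int.toNat 3 = 3 from rfl,
    show Int.toNat 4 = 4 from rfl, show Int.toNat 5 = 5 from rfl,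
    show Int.toNat 6 = 6 from rfl, show Int.toNat 7 = 7 from rfl,
    show Int.toNat 8 = 8 from rfl]
  split_ifs <;>
    first
      | rfl
      | (exfalso; omega)
      | (rw [show l / 200 = 0 from by omega]; rfl)
      | (rw [show l / 200 = 1 from by omega]; rfl)
      | (rw [show l / 200 = 2 from by omega]; rfl)
      | (rw [show l / 200 = 3 from by omega]; rfl)
      | (rw [show l / 200 = 4 from by omega]; rfl)
      | (rw [show l / 200 = 5 from by omega]; rfl)

lemma pvStep_eq (counts : PySem.Dict String Int) (l : Int) :
    (match pvScanA l (PySem.List.pyRange 0 ((pvBins.length : Int) - 1) 1) with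
      | some lbl => counts.modify lbl 0 (· + 1)
      | none => counts.modify ">=2000" 0 (· + 1)) =
    counts.insert (pvLabelB l) (counts.getD (pvLabelB l) 0 + 1) := by
  rw [pvRange_eval]
  have h := pvLabel_eq l
  cases hs : pvScanA l [0, 1, 2, 3, 4, 5, 6, 7] with
  | none =>
    rw [hs] at h
    simp only [Option.getD_none] at h ⊢
    rw [← h]; rfl
  | some s =>
    rw [hs] at h
    simp only [Option.getD_some] at h ⊢
    rw [← h]; rfl

-- ===== VERDICT (by name: the statement is the Claim_ definition above) =====
theorem length_histogram_py_spec : Claim_equal_length_histogram_py := by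
  intro lengths _
  unfold Spec_length_histogram_py length_histogram_py length_histogram_py_alt
  apply congrArg PySem.Dict.items
  apply PySem.List.foldl_congr_mem
  intro acc x _
  exact pvStep_eq acc x
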